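-- pv_equiv track=rewrite | github.com/mlbaker-uth/CRYOMODEL | chimerax-bundles/crymodel/src/pdbdomain_tool.py | _ranges_from_resnums
-- ===== SOURCE A (Python) =====
-- from typing import Dict, List, Optional, Tuple
--
-- def _ranges_from_resnums(entries: Dict[str, Dict[str, List[int]]]) -> Dict[str, Dict[str, List[str]]]:
--     output: Dict[str, Dict[str, List[str]]] = {}
--     for domain, chain_map in entries.items():
--         output[domain] = {}
--         for chain, resnums in chain_map.items():
--             resnums = sorted(set(resnums))
--             ranges: List[Tuple[int, int]] = []
--             start = prev = resnums[0]
--             for r in resnums[1:]: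
--                 if r == prev + 1:
--                     prev = r
--                     continue
--                 ranges.append((start, prev))
--                 start = prev = r
--             ranges.append((start, prev))
--             output[domain][chain] = [f"{s}-{e}" if s != e else f"{s}" for s, e in ranges]
--     return output
-- ===== SOURCE B (Python) =====
-- from typing import Dict, List
--
--
-- def _ranges_from_resnums(entries: Dict[str, Dict[str, List[int]]]) -> Dict[str, Dict[str, List[str]]]:
--     return {
--         domain: {chain: _collapse(resnums) for chain, resnums in chain_map.items()}
--         for domain, chain_map in entries.items()
--     }
--
--
-- def _collapse(resnums: List[int]) -> List[str]:
--     uniq = set(resnums)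
--     s = sorted(uniq)
--     starts = [n for n in s if n - 1 not in uniq]
--     ends = [n for n in s if n + 1 not in uniq]
--     return [f"{a}-{b}" if a != b else f"{a}" for a, b in zip(starts, ends)]
-- ===== Notes on version B (the rewrite author's own statement) =====
-- stated objective: alternative
-- what changed: Replaces A's sequential start/prev run-detection loop with a set-membership characterization: run starts are the sorted unique values n with n-1 not in the set, run ends those with n+1 not in the set, zipped pairwise; plus nested dict comprehensions instead of A's explicit dict-building loops.
import Mathlib
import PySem

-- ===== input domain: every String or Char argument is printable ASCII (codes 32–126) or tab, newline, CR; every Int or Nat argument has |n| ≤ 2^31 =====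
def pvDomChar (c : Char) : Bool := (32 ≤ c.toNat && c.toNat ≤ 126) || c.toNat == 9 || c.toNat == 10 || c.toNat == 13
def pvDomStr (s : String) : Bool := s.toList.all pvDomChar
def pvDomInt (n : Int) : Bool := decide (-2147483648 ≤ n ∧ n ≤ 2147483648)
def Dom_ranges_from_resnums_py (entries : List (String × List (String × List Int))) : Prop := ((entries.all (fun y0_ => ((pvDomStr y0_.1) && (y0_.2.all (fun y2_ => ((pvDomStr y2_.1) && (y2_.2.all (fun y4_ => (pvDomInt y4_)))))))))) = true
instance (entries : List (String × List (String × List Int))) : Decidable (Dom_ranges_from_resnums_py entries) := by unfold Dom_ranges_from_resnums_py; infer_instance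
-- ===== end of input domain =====

-- B replaces A's sequential run-detection loop by a set-membership characterization of run
-- starts (n-1 not in set) and ends (n+1 not in set), zipped pairwise (alternative, same cost).

-- ===== PORT A =====
-- f"{s}-{e}" if s != e else f"{s}"  (the formatting expression, identical in both Pythons)
def pyFmt (s e : Int) : String :=
  if s ≠ e then PySem.Int.toStr s ++ "-" ++ PySem.Int.toStr e else PySem.Int.toStr s

-- body of A's inner `for chain, resnums` loop: sorted(set(resnums)), the start/prev run loop, formatting
def rangesA (resnums : List Int) : List String :=
  match PySem.List.sorted (PySem.Set.ofList resnums) (fun x => x) false with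
  | [] => []   -- Python: `resnums[0]` raises IndexError here; excluded by Pre_
  | h :: t =>
    let st := t.foldl (fun (acc : List (Int × Int) × Int × Int) r =>
        if r = acc.2.2 + 1 then (acc.1, acc.2.1, r)
        else (acc.1 ++ [(acc.2.1, acc.2.2)], r, r)) ([], h, h)
    (st.1 ++ [(st.2.1, st.2.2)]).map (fun se => pyFmt se.1 se.2)

-- entries is a Python dict (unique keys after dict collapsing), so `output[domain] = {}` /
-- `output[domain][chain] = …` always bind fresh keys, transliterated as list appends.
def ranges_from_resnums_py (entries : List (String × List (String × List Int))) : List (String × List (String × List String)) :=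
  (PySem.Dict.ofList entries).items.foldl (fun out dc =>
    out ++ [(dc.1, (PySem.Dict.ofList dc.2).items.foldl (fun inner cr =>
      inner ++ [(cr.1, rangesA cr.2)]) [])]) []

-- ===== PORT B =====
-- B's `_collapse`: uniq = set(resnums); s = sorted(uniq);
-- starts = [n for n in s if n-1 not in uniq]; ends = [n for n in s if n+1 not in uniq]; zip & format
def collapseB (resnums : List Int) : List String :=
  let uniq : PySem.Set Int := PySem.Set.ofList resnums
  let s := PySem.List.sorted uniq (fun x => x) false
  let starts := s.filter (fun n => !(PySem.Set.contains uniq (n - 1)))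
  let ends := s.filter (fun n => !(PySem.Set.contains uniq (n + 1)))
  (starts.zip ends).map (fun ab => pyFmt ab.1 ab.2)

def ranges_from_resnums_py_alt (entries : List (String × List (String × List Int))) : List (String × List (String × List String)) :=
  (PySem.Dict.ofList entries).items.map (fun dc =>
    (dc.1, (PySem.Dict.ofList dc.2).items.map (fun cr => (cr.1, collapseB cr.2))))

-- ===== PRECONDITION & SPEC =====
-- Pre_ excludes exactly the inputs on which A raises IndexError: some chain whose (dict-collapsed)
-- residue list is empty, where `resnums[0]` fails.
def Pre_ranges_from_resnums_py (entries : List (String × List (String × List Int))) : Prop :=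
  ∀ dc ∈ (PySem.Dict.ofList entries).items, ∀ cr ∈ (PySem.Dict.ofList dc.2).items, cr.2 ≠ []
instance (entries : List (String × List (String × List Int))) : Decidable (Pre_ranges_from_resnums_py entries) := by unfold Pre_ranges_from_resnums_py; infer_instance

def pvWitness_ranges_from_resnums_py : (List (String × List (String × List Int))) :=
  [("D1", [("A", [1, 2, 3, 7]), ("B", [5])]), ("D2", [("A", [2, 2, -1])])]

def Spec_ranges_from_resnums_py (entries : List (String × List (String × List Int))) (out : List (String × List (String × List String))) : Prop := out = ranges_from_resnums_py_alt entries
instance (entries : List (String × List (String × List Int))) (out : List (String × List (String × List String))) : Decidable (Spec_ranges_from_resnums_py entries out) := by unfold Spec_ranges_from_resnums_py; infer_instance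

-- ===== CLAIM (what is proved, stated in full; the proofs are below) =====
def Claim_equal_ranges_from_resnums_py : Prop := ∀ (entries : List (String × List (String × List Int))), Dom_ranges_from_resnums_py entries → Pre_ranges_from_resnums_py entries → Spec_ranges_from_resnums_py entries (ranges_from_resnums_py entries)


-- ===== LEMMAS AND PROOFS =====

-- A's run loop as a structural recursion over the tail
def runsA (start prev : Int) : List Int → List (Int × Int)
  | [] => [(start, prev)]
  | r :: rest => if r = prev + 1 then runsA start r rest else (start, prev) :: runsA r r rest

theorem foldl_runsA (t : List Int) (acc : List (Int × Int)) (start prev : Int) :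
    (t.foldl (fun (a : List (Int × Int) × Int × Int) r =>
        if r = a.2.2 + 1 then (a.1, a.2.1, r)
        else (a.1 ++ [(a.2.1, a.2.2)], r, r)) (acc, start, prev)).1 ++
      [((t.foldl (fun (a : List (Int × Int) × Int × Int) r =>
        if r = a.2.2 + 1 then (a.1, a.2.1, r)
        else (a.1 ++ [(a.2.1, a.2.2)], r, r)) (acc, start, prev)).2.1,
        (t.foldl (fun (a : List (Int × Int) × Int × Int) r =>
        if r = a.2.2 + 1 then (a.1, a.2.1, r)
        else (a.1 ++ [(a.2.1, a.2.2)], r, r)) (acc, start, prev)).2.2)]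
    = acc ++ runsA start prev t := by
  induction t generalizing acc start prev with
  | nil => simp [runsA]
  | cons r rest ih =>
    simp only [List.foldl_cons, runsA]
    split_ifs with h
    · exact ih acc start r
    · rw [ih (acc ++ [(start, prev)]) r r]
      simp

-- membership-filters over a fixed ambient list s
def fS (s l : List Int) : List Int := l.filter (fun n => !decide ((n - 1) ∈ s))
def fE (s l : List Int) : List Int := l.filter (fun n => !decide ((n + 1) ∈ s))

-- the starts/ends characterization: on a strictly increasing list p :: t, the starts-filter
-- begins with p, and zipping (with any forced first start a) against the ends-filter yields A's runs
theorem zipSE (t : List Int) (p : Int) (hp : (p :: t).Pairwise (· < ·)) :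
    ∃ X, fS (p :: t) (p :: t) = p :: X ∧
      ∀ a, (a :: X).zip (fE (p :: t) (p :: t)) = runsA a p t := by
  induction t generalizing p with
  | nil =>
    refine ⟨[], ?_, ?_⟩
    · simp [fS]
    · intro a
      simp [fE, runsA]
  | cons r rest ih =>
    have hpr : p < r := (List.pairwise_cons.1 hp).1 r (by simp)
    have hprest : ∀ x ∈ rest, p < x := fun x hx =>
      (List.pairwise_cons.1 hp).1 x (by simp [hx])
    have hp' : (r :: rest).Pairwise (· < ·) := (List.pairwise_cons.1 hp).2
    have hrrest : ∀ x ∈ rest, r < x := fun x hx => (List.pairwise_cons.1 hp').1 x hx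
    obtain ⟨X', hX', hzip'⟩ := ih r hp'
    have hpm : ((p : Int) - 1) ∉ (p :: r :: rest) := by
      simp only [List.mem_cons]
      rintro (h | h | h)
      · omega
      · omega
      · have := hprest _ h; omega
    -- for n in r :: rest, n+1 ∈ p :: r :: rest ↔ n+1 ∈ r :: rest
    have hEtail : (r :: rest).filter (fun n => !decide ((n + 1) ∈ (p :: r :: rest)))
        = fE (r :: rest) (r :: rest) := by
      unfold fE
      refine List.filter_congr (fun n hn => ?_)
      have hnp : p < n := by
        rcases List.mem_cons.1 hn with h | h
        · omega
        · exact hprest _ h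
      simp only [List.mem_cons]
      congr 1
      simp only [decide_eq_decide]
      constructor
      · rintro (h1 | h2)
        · omega
        · exact h2
      · tauto
    by_cases hcons : r = p + 1
    · -- r continues p's run: p is not an end, r is not a start
      refine ⟨X', ?_, ?_⟩
      · have h1 : fS (p :: r :: rest) (p :: r :: rest)
            = p :: (r :: rest).filter (fun n => !decide ((n - 1) ∈ (p :: r :: rest))) := by
          unfold fS
          rw [List.filter_cons]
          simp [hpm]
        have h2 : (r :: rest).filter (fun n => !decide ((n - 1) ∈ (p :: r :: rest))) = X' := by
          rw [List.filter_cons]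
          have hrdrop : ((r : Int) - 1) ∈ (p :: r :: rest) := by
            simp only [List.mem_cons]; left; omega
          simp only [hrdrop, decide_true, Bool.not_true]
          rw [if_neg (by simp)]
          have hXX : fS (r :: rest) (r :: rest) = r :: X' := hX'
          unfold fS at hXX
          rw [List.filter_cons] at hXX
          have hrkeep : ((r : Int) - 1) ∉ (r :: rest) := by
            simp only [List.mem_cons]
            rintro (h | h)
            · omega
            · have := hrrest _ h; omega
          simp only [hrkeep, decide_false, Bool.not_false, if_pos] at hXX
          have hcong : (rest.filter (fun n => !decide ((n - 1) ∈ (p :: r :: rest))))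
              = rest.filter (fun n => !decide ((n - 1) ∈ (r :: rest))) := by
            refine List.filter_congr (fun n hn => ?_)
            have hnr : r < n := hrrest _ hn
            simp only [List.mem_cons]
            congr 1
            simp only [decide_eq_decide]
            constructor
            · rintro (h1 | h2)
              · omega
              · exact h2
            · tauto
          rw [hcong]
          simpa using hXX
        rw [h1, h2]
      · intro a
        -- ends: p is dropped (p+1 = r ∈ s), tail via hEtail
        have hE : fE (p :: r :: rest) (p :: r :: rest) = fE (r :: rest) (r :: rest) := by
          unfold fE
          rw [List.filter_cons]
          have hin : ((p : Int) + 1) ∈ (p :: r :: rest) := by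
            simp only [List.mem_cons]; right; left; omega
          simp only [hin, decide_true, Bool.not_true]
          rw [if_neg (by simp)]
          exact hEtail
        rw [hE, hzip' a]
        simp [runsA, hcons]
    · -- r starts a new run: p is an end, r is a start
      refine ⟨r :: X', ?_, ?_⟩
      · have h1 : fS (p :: r :: rest) (p :: r :: rest)
            = p :: (r :: rest).filter (fun n => !decide ((n - 1) ∈ (p :: r :: rest))) := by
          unfold fS
          rw [List.filter_cons]
          simp [hpm]
        have h2 : (r :: rest).filter (fun n => !decide ((n - 1) ∈ (p :: r :: rest)))
            = fS (r :: rest) (r :: rest) := by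
          unfold fS
          refine List.filter_congr (fun n hn => ?_)
          have hnr : p + 1 < n := by
            rcases List.mem_cons.1 hn with h | h
            · omega
            · have := hrrest _ h; omega
          simp only [List.mem_cons]
          congr 1
          simp only [decide_eq_decide]
          constructor
          · rintro (h1 | h2)
            · omega
            · exact h2
          · tauto
        rw [h1, h2, hX']
      · intro a
        have hE : fE (p :: r :: rest) (p :: r :: rest)
            = p :: fE (r :: rest) (r :: rest) := by
          unfold fE
          rw [List.filter_cons]
          have hout : ((p : Int) + 1) ∉ (p :: r :: rest) := by
            simp only [List.mem_cons]
            rintro (h | h | h)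
            · omega
            · omega
            · have := hrrest _ h; omega
          simp only [hout, decide_false, Bool.not_false, if_pos]
          rw [hEtail]
          rfl
        rw [hE]
        simp only [List.zip_cons_cons]
        rw [hzip' r]
        simp [runsA, hcons]

theorem rangesA_eq_collapseB (resnums : List Int) : rangesA resnums = collapseB resnums := by
  unfold rangesA collapseB
  have hmem : ∀ x : Int, PySem.Set.contains (PySem.Set.ofList resnums) x
      = decide (x ∈ PySem.List.sorted (PySem.Set.ofList resnums) (fun x => x) false) := by
    intro x
    rw [Bool.eq_iff_iff]
    simp [PySem.List.mem_sorted]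
  have hpw : (PySem.List.sorted (PySem.Set.ofList resnums) (fun x => x) false).Pairwise (· < ·) :=
    PySem.List.sorted_ofList_pairwise_lt resnums
  dsimp only
  have hS : (PySem.List.sorted (PySem.Set.ofList resnums) (fun x => x) false).filter
        (fun n => !(PySem.Set.contains (PySem.Set.ofList resnums) (n - 1)))
      = fS (PySem.List.sorted (PySem.Set.ofList resnums) (fun x => x) false)
           (PySem.List.sorted (PySem.Set.ofList resnums) (fun x => x) false) := by
    unfold fS
    exact List.filter_congr (fun n _ => by rw [hmem])
  have hEq : (PySem.List.sorted (PySem.Set.ofList resnums) (fun x => x) false).filter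
        (fun n => !(PySem.Set.contains (PySem.Set.ofList resnums) (n + 1)))
      = fE (PySem.List.sorted (PySem.Set.ofList resnums) (fun x => x) false)
           (PySem.List.sorted (PySem.Set.ofList resnums) (fun x => x) false) := by
    unfold fE
    exact List.filter_congr (fun n _ => by rw [hmem])
  rw [hS, hEq]
  generalize hg : PySem.List.sorted (PySem.Set.ofList resnums) (fun x => x) false = s at hpw ⊢
  cases s with
  | nil => simp [fS, fE]
  | cons h t =>
    obtain ⟨X, hX, hzip⟩ := zipSE t h hpw
    dsimp only
    rw [foldl_runsA t [] h h, hX, hzip h]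
    simp

theorem inner_eq (m : List (String × List Int)) (acc : List (String × List String)) :
    m.foldl (fun inner cr => inner ++ [(cr.1, rangesA cr.2)]) acc
      = acc ++ m.map (fun cr => (cr.1, collapseB cr.2)) := by
  induction m generalizing acc with
  | nil => simp
  | cons x xs ih =>
    rw [List.foldl_cons, ih, rangesA_eq_collapseB]
    simp

theorem outer_eq (l : List (String × List (String × List Int))) (acc : List (String × List (String × List String))) :
    l.foldl (fun out dc =>
      out ++ [(dc.1, (PySem.Dict.ofList dc.2).items.foldl (fun inner cr =>
        inner ++ [(cr.1, rangesA cr.2)]) [])]) acc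
      = acc ++ l.map (fun dc =>
          (dc.1, (PySem.Dict.ofList dc.2).items.map (fun cr => (cr.1, collapseB cr.2)))) := by
  induction l generalizing acc with
  | nil => simp
  | cons x xs ih =>
    rw [List.foldl_cons, ih, inner_eq]
    simp

-- ===== VERDICT (by name: the statement is the Claim_ definition above) =====
theorem ranges_from_resnums_py_spec : Claim_equal_ranges_from_resnums_py := by
  intro entries _ _
  unfold Spec_ranges_from_resnums_py ranges_from_resnums_py ranges_from_resnums_py_alt
  rw [outer_eq]
  simp
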